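-- pv_equiv track=rewrite | github.com/PlusLabNLP/ACCENT | eventualization/aser_runner.py | replace_pronoun
-- ===== SOURCE A (Python) =====
-- def replace_pronoun(head, tail, single):
--     head_words = head.split()
--     tail_words = tail.split()
--     head_words_modified = []
--     tail_words_modified = []
--     if 'i' in tail_words or 'I' in tail_words:
--         for word in tail_words:
--             if word == 'i' or word == 'I':
--                 word = 'PersonX'
--             if word == 'my' or word == 'My':
--                 word = "PersonX's"
--             if word == 'you' or word == 'You':
--                 word = 'PersonY'
--             if word == 'your' or word == 'Your':
--                 word = "PersonY's"
--             tail_words_modified.append(word)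
--         for word in head_words:
--             if single:  # The speaker doesn't change.
--                 if word == 'i' or word == 'I':
--                     word = 'PersonX'
--                 if word == 'my' or word == 'My':
--                     word = "PersonX's"
--                 if word == 'you' or word == 'You':
--                     word = 'PersonY'
--                 if word == 'your' or word == 'Your':
--                     word = "PersonY's"
--                 head_words_modified.append(word)
--             else:  # The speaker changes.
--                 if word == 'i' or word == 'I':
--                     word = 'PersonY'
--                 if word == 'my' or word == 'My':
--                     word = "PersonY's"
--                 if word == 'you' or word == 'You':
--                     word = 'PersonX'
--                 if word == 'your' or word == 'Your':
--                     word = "PersonX's"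
--                 head_words_modified.append(word)
--     elif 'you' in tail_words or 'You' in tail_words:
--         for word in tail_words:
--             if word == 'i' or word == 'I':
--                 word = 'PersonY'
--             if word == 'my' or word == 'My':
--                 word = "PersonY's"
--             if word == 'you' or word == 'You':
--                 word = 'PersonX'
--             if word == 'your' or word == 'Your':
--                 word = "PersonX's"
--             tail_words_modified.append(word)
--         for word in head_words:
--             if single:  # The speaker doesn't change.
--                 if word == 'i' or word == 'I':
--                     word = 'PersonY'
--                 if word == 'my' or word == 'My':
--                     word = "PersonY's"
--                 if word == 'you' or word == 'You':
--                     word = 'PersonX'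
--                 if word == 'your' or word == 'Your':
--                     word = "PersonX's"
--                 head_words_modified.append(word)
--             else:  # The speaker changes.
--                 if word == 'i' or word == 'I':
--                     word = 'PersonX'
--                 if word == 'my' or word == 'My':
--                     word = "PersonX's"
--                 if word == 'you' or word == 'You':
--                     word = 'PersonY'
--                 if word == 'your' or word == 'Your':
--                     word = "PersonY's"
--                 head_words_modified.append(word)
--     else:
--         head_words_modified = head_words
--         tail_words_modified = tail_words
--
--     # Check grammar error.
--     for i in range(len(head_words_modified)):
--         if head_words_modified[i] == "'m" or head_words_modified[i] == "'re":
--             head_words_modified[i] = 'be'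
--     for i in range(len(tail_words_modified)):
--         if tail_words_modified[i] == "'m" or tail_words_modified[i] == "'re":
--             tail_words_modified[i] = 'be'
--
--     head_modified = ' '.join(head_words_modified)
--     tail_modified = ' '.join(tail_words_modified)
--     # Fix trivial typos.
--     head_modified = head_modified.replace('PersonX m ', 'PersonX be ')
--     head_modified = head_modified.replace('PersonY m ', 'PersonY be ')
--     head_modified = head_modified.replace('PersonX re ', 'PersonX be ')
--     head_modified = head_modified.replace('PersonY re ', 'PersonY be ')
--     tail_modified = tail_modified.replace('PersonX m ', 'PersonX be ')
--     tail_modified = tail_modified.replace('PersonY m ', 'PersonY be ')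
--     tail_modified = tail_modified.replace('PersonX re ', 'PersonX be ')
--     tail_modified = tail_modified.replace('PersonY re ', 'PersonY be ')
--
--     return head_modified, tail_modified
-- ===== SOURCE B (Python) =====
-- _GRAMMAR = [("'m", 'be'), ("'re", 'be')]
-- _TYPOS = [('PersonX m ', 'PersonX be '), ('PersonY m ', 'PersonY be '),
--           ('PersonX re ', 'PersonX be '), ('PersonY re ', 'PersonY be ')]
--
--
-- def _pairs(x, y):
--     return [('i', x), ('I', x), ('my', x + "'s"), ('My', x + "'s"),
--             ('you', y), ('You', y), ('your', y + "'s"), ('Your', y + "'s")]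
--
--
-- def _sub(words, old, new):
--     return [new if w == old else w for w in words]
--
--
-- def _finish(words):
--     for old, new in _GRAMMAR:
--         words = _sub(words, old, new)
--     s = ' '.join(words)
--     for pat, rep in _TYPOS:
--         s = s.replace(pat, rep)
--     return s
--
--
-- def replace_pronoun(head, tail, single):
--     head_words = head.split()
--     tail_words = tail.split()
--     if 'i' in tail_words or 'I' in tail_words:
--         tail_pairs = _pairs('PersonX', 'PersonY')
--         head_pairs = tail_pairs if single else _pairs('PersonY', 'PersonX')
--     elif 'you' in tail_words or 'You' in tail_words:
--         tail_pairs = _pairs('PersonY', 'PersonX')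
--         head_pairs = tail_pairs if single else _pairs('PersonX', 'PersonY')
--     else:
--         tail_pairs = head_pairs = []
--     for old, new in head_pairs:
--         head_words = _sub(head_words, old, new)
--     for old, new in tail_pairs:
--         tail_words = _sub(tail_words, old, new)
--     return _finish(head_words), _finish(tail_words)
-- ===== Notes on version B (the rewrite author's own statement) =====
-- stated objective: alternative
-- what changed: A rewrites each word once inside four mirrored per-word if-chain loops plus a separate in-place index loop; B instead applies a sequence of whole-list substitution passes (one pass per pronoun pair, derived from a single parameterized pair list, then two grammar passes), i.e. staged full-list passes with no per-word branch chain, before the same join and final string replaces.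
import Mathlib
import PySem

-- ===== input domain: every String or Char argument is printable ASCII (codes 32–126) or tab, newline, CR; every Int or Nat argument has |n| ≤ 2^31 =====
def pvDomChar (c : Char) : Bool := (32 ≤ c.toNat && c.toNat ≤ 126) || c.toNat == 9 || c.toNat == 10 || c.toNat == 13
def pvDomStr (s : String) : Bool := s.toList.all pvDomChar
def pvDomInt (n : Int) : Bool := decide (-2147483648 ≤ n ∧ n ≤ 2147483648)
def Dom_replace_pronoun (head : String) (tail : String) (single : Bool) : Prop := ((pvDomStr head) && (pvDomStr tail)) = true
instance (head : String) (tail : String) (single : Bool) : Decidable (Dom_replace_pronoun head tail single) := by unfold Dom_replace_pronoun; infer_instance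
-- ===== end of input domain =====

-- B replaces A's four mirrored per-word if-chain loops and the in-place grammar loop by a
-- sequence of whole-list substitution passes driven by one parameterized pair list
-- (objective: alternative decomposition, same cost).

-- ===== PORT A =====
-- the 4-if block of A's first branch (and of its mirrored uses): i→PersonX, you→PersonY
def pvChainXY (w : String) : String :=
  let w := if w == "i" || w == "I" then "PersonX" else w
  let w := if w == "my" || w == "My" then "PersonX's" else w
  let w := if w == "you" || w == "You" then "PersonY" else w
  if w == "your" || w == "Your" then "PersonY's" else w

-- the mirrored 4-if block: i→PersonY, you→PersonX
def pvChainYX (w : String) : String :=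
  let w := if w == "i" || w == "I" then "PersonY" else w
  let w := if w == "my" || w == "My" then "PersonY's" else w
  let w := if w == "you" || w == "You" then "PersonX" else w
  if w == "your" || w == "Your" then "PersonX's" else w

-- A's in-place grammar-fix loop: for i in range(len(xs)): if xs[i] in ("'m","'re"): xs[i]='be'
def pvGramLoop (xs : List String) : List String :=
  (PySem.List.pyRange 0 (xs.length : Int) 1).foldl
    (fun acc i =>
      if PySem.List.pyGetD acc i "" == "'m" || PySem.List.pyGetD acc i "" == "'re"
      then PySem.List.pySetD acc i "be" else acc) xs

def replace_pronoun (head : String) (tail : String) (single : Bool) : String × String :=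
  let head_words := PySem.Str.split₀ head
  let tail_words := PySem.Str.split₀ tail
  let p :=
    if tail_words.contains "i" || tail_words.contains "I" then
      (head_words.foldl (fun acc w =>
          if single then acc ++ [pvChainXY w] else acc ++ [pvChainYX w]) [],
       tail_words.foldl (fun acc w => acc ++ [pvChainXY w]) [])
    else if tail_words.contains "you" || tail_words.contains "You" then
      (head_words.foldl (fun acc w =>
          if single then acc ++ [pvChainYX w] else acc ++ [pvChainXY w]) [],
       tail_words.foldl (fun acc w => acc ++ [pvChainYX w]) [])
    else (head_words, tail_words)
  let head_words_modified := pvGramLoop p.1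
  let tail_words_modified := pvGramLoop p.2
  let head_modified := PySem.Str.join " " head_words_modified
  let tail_modified := PySem.Str.join " " tail_words_modified
  let head_modified := PySem.Str.replace head_modified "PersonX m " "PersonX be "
  let head_modified := PySem.Str.replace head_modified "PersonY m " "PersonY be "
  let head_modified := PySem.Str.replace head_modified "PersonX re " "PersonX be "
  let head_modified := PySem.Str.replace head_modified "PersonY re " "PersonY be "
  let tail_modified := PySem.Str.replace tail_modified "PersonX m " "PersonX be "
  let tail_modified := PySem.Str.replace tail_modified "PersonY m " "PersonY be "
  let tail_modified := PySem.Str.replace tail_modified "PersonX re " "PersonX be "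
  let tail_modified := PySem.Str.replace tail_modified "PersonY re " "PersonY be "
  (head_modified, tail_modified)

-- ===== PORT B =====
def pvGrammar : List (String × String) := [("'m", "be"), ("'re", "be")]

def pvTypos : List (String × String) :=
  [("PersonX m ", "PersonX be "), ("PersonY m ", "PersonY be "),
   ("PersonX re ", "PersonX be "), ("PersonY re ", "PersonY be ")]

def pvPairs (x y : String) : List (String × String) :=
  [("i", x), ("I", x), ("my", x ++ "'s"), ("My", x ++ "'s"),
   ("you", y), ("You", y), ("your", y ++ "'s"), ("Your", y ++ "'s")]

-- one whole-list substitution pass: [new if w == old else w for w in words]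
def pvSub (words : List String) (old new : String) : List String :=
  words.map (fun w => if w == old then new else w)

def pvFinish (words : List String) : String :=
  let words := pvGrammar.foldl (fun ws pr => pvSub ws pr.1 pr.2) words
  let s := PySem.Str.join " " words
  pvTypos.foldl (fun o pr => PySem.Str.replace o pr.1 pr.2) s

def replace_pronoun_alt (head : String) (tail : String) (single : Bool) : String × String :=
  let head_words := PySem.Str.split₀ head
  let tail_words := PySem.Str.split₀ tail
  let ps :=
    if tail_words.contains "i" || tail_words.contains "I" then
      let tp := pvPairs "PersonX" "PersonY"
      ((if single then tp else pvPairs "PersonY" "PersonX"), tp)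
    else if tail_words.contains "you" || tail_words.contains "You" then
      let tp := pvPairs "PersonY" "PersonX"
      ((if single then tp else pvPairs "PersonX" "PersonY"), tp)
    else ([], [])
  let hw := ps.1.foldl (fun ws pr => pvSub ws pr.1 pr.2) head_words
  let tw := ps.2.foldl (fun ws pr => pvSub ws pr.1 pr.2) tail_words
  (pvFinish hw, pvFinish tw)

-- ===== PRECONDITION & SPEC =====
def Spec_replace_pronoun (head : String) (tail : String) (single : Bool) (out : String × String) : Prop := out = replace_pronoun_alt head tail single
instance (head : String) (tail : String) (single : Bool) (out : String × String) : Decidable (Spec_replace_pronoun head tail single out) := by unfold Spec_replace_pronoun; infer_instance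

-- ===== CLAIM (what is proved, stated in full; the proofs are below) =====
def Claim_equal_replace_pronoun : Prop := ∀ (head : String) (tail : String) (single : Bool), Dom_replace_pronoun head tail single → Spec_replace_pronoun head tail single (replace_pronoun head tail single)

-- ===== LEMMAS AND PROOFS =====

-- the word-level grammar fix the in-place loop performs
def pvGfix (w : String) : String := if w == "'m" || w == "'re" then "be" else w

theorem pvGramLoop_aux (todo done : List String) :
    (PySem.List.pyRange (done.length : Int) ((done.length : Int) + (todo.length : Int)) 1).foldl
      (fun acc i =>
        if PySem.List.pyGetD acc i "" == "'m" || PySem.List.pyGetD acc i "" == "'re"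
        then PySem.List.pySetD acc i "be" else acc) (done ++ todo)
    = done ++ todo.map pvGfix := by
  induction todo generalizing done with
  | nil =>
    rw [show ((done.length : Int) + (([] : List String).length : Int)) = (done.length : Int) by simp,
      PySem.List.pyRange_one_eq_nil le_rfl]
    simp
  | cons t ts ih =>
    rw [PySem.List.pyRange_one_cons (by push_cast [List.length_cons]; omega)]
    simp only [List.foldl_cons]
    have hget : PySem.List.pyGetD (done ++ t :: ts) (done.length : Int) "" = t := by
      rw [PySem.List.pyGetD_natCast]
      simp [List.getD]
    have hset : PySem.List.pySetD (done ++ t :: ts) (done.length : Int) "be" = done ++ "be" :: ts := by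
      rw [PySem.List.pySetD_natCast]
      simp
    have hstep :
        (if PySem.List.pyGetD (done ++ t :: ts) (done.length : Int) "" == "'m" ||
            PySem.List.pyGetD (done ++ t :: ts) (done.length : Int) "" == "'re"
         then PySem.List.pySetD (done ++ t :: ts) (done.length : Int) "be"
         else done ++ t :: ts)
        = (done ++ [pvGfix t]) ++ ts := by
      rw [hget, hset, pvGfix]
      split_ifs with h <;> simp
    rw [hstep]
    have hlen : ((done.length : Int) + 1) = (((done ++ [pvGfix t]).length : Int)) := by
      push_cast [List.length_append, List.length_cons, List.length_nil]; ring
    have hend : ((done.length : Int) + ((t :: ts).length : Int))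
        = ((done ++ [pvGfix t]).length : Int) + (ts.length : Int) := by
      push_cast [List.length_append, List.length_cons, List.length_nil]; ring
    rw [hlen, hend, ih (done ++ [pvGfix t])]
    simp

theorem pvGramLoop_eq_map (xs : List String) : pvGramLoop xs = xs.map pvGfix := by
  have h := pvGramLoop_aux xs []
  simpa [pvGramLoop] using h

-- B's two grammar passes compose to A's single per-word grammar fix
theorem pvGrammar_stages (ws : List String) :
    pvGrammar.foldl (fun ws pr => pvSub ws pr.1 pr.2) ws = ws.map pvGfix := by
  simp only [pvGrammar, List.foldl_cons, List.foldl_nil, pvSub, List.map_map]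
  refine List.map_congr_left ?_
  intro w _
  simp only [Function.comp, pvGfix]
  by_cases h1 : w = "'m"
  · subst h1; decide
  by_cases h2 : w = "'re"
  · subst h2; decide
  have e1 : (w == "'m") = false := by simp [beq_iff_eq, h1]
  have e2 : (w == "'re") = false := by simp [beq_iff_eq, h2]
  simp [e1, e2]

-- B's eight substitution passes compose to A's 4-if chain (XY orientation)
theorem pvStage_XY (ws : List String) :
    (pvPairs "PersonX" "PersonY").foldl (fun ws pr => pvSub ws pr.1 pr.2) ws
    = ws.map pvChainXY := by
  simp only [pvPairs, List.foldl_cons, List.foldl_nil, pvSub, List.map_map]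
  refine List.map_congr_left ?_
  intro w _
  simp only [Function.comp]
  by_cases h1 : w = "i"; · subst h1; decide
  by_cases h2 : w = "I"; · subst h2; decide
  by_cases h3 : w = "my"; · subst h3; decide
  by_cases h4 : w = "My"; · subst h4; decide
  by_cases h5 : w = "you"; · subst h5; decide
  by_cases h6 : w = "You"; · subst h6; decide
  by_cases h7 : w = "your"; · subst h7; decide
  by_cases h8 : w = "Your"; · subst h8; decide
  have e1 : (w == "i") = false := by simp [beq_iff_eq, h1]
  have e2 : (w == "I") = false := by simp [beq_iff_eq, h2]
  have e3 : (w == "my") = false := by simp [beq_iff_eq, h3]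
  have e4 : (w == "My") = false := by simp [beq_iff_eq, h4]
  have e5 : (w == "you") = false := by simp [beq_iff_eq, h5]
  have e6 : (w == "You") = false := by simp [beq_iff_eq, h6]
  have e7 : (w == "your") = false := by simp [beq_iff_eq, h7]
  have e8 : (w == "Your") = false := by simp [beq_iff_eq, h8]
  simp [pvChainXY, e1, e2, e3, e4, e5, e6, e7, e8]

-- B's eight substitution passes compose to A's 4-if chain (YX orientation)
theorem pvStage_YX (ws : List String) :
    (pvPairs "PersonY" "PersonX").foldl (fun ws pr => pvSub ws pr.1 pr.2) ws
    = ws.map pvChainYX := by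
  simp only [pvPairs, List.foldl_cons, List.foldl_nil, pvSub, List.map_map]
  refine List.map_congr_left ?_
  intro w _
  simp only [Function.comp]
  by_cases h1 : w = "i"; · subst h1; decide
  by_cases h2 : w = "I"; · subst h2; decide
  by_cases h3 : w = "my"; · subst h3; decide
  by_cases h4 : w = "My"; · subst h4; decide
  by_cases h5 : w = "you"; · subst h5; decide
  by_cases h6 : w = "You"; · subst h6; decide
  by_cases h7 : w = "your"; · subst h7; decide
  by_cases h8 : w = "Your"; · subst h8; decide
  have e1 : (w == "i") = false := by simp [beq_iff_eq, h1]
  have e2 : (w == "I") = false := by simp [beq_iff_eq, h2]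
  have e3 : (w == "my") = false := by simp [beq_iff_eq, h3]
  have e4 : (w == "My") = false := by simp [beq_iff_eq, h4]
  have e5 : (w == "you") = false := by simp [beq_iff_eq, h5]
  have e6 : (w == "You") = false := by simp [beq_iff_eq, h6]
  have e7 : (w == "your") = false := by simp [beq_iff_eq, h7]
  have e8 : (w == "Your") = false := by simp [beq_iff_eq, h8]
  simp [pvChainYX, e1, e2, e3, e4, e5, e6, e7, e8]

-- pvFinish applied to a list of already-substituted words = A's tail of the pipeline
theorem pvFinish_eq (ws : List String) :
    pvFinish ws
    = PySem.Str.replace (PySem.Str.replace (PySem.Str.replace (PySem.Str.replace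
        (PySem.Str.join " " (pvGramLoop ws))
        "PersonX m " "PersonX be ") "PersonY m " "PersonY be ")
        "PersonX re " "PersonX be ") "PersonY re " "PersonY be " := by
  simp only [pvFinish, pvTypos, List.foldl_cons, List.foldl_nil,
    pvGrammar_stages, pvGramLoop_eq_map]

-- ===== VERDICT (by name: the statement is the Claim_ definition above) =====
theorem replace_pronoun_spec : Claim_equal_replace_pronoun := by
  intro head tail single _
  unfold Spec_replace_pronoun replace_pronoun replace_pronoun_alt
  by_cases hI : ((PySem.Str.split₀ tail).contains "i" || (PySem.Str.split₀ tail).contains "I") = true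
  · cases single with
    | true =>
      simp only [hI, if_true, reduceIte]
      rw [pvFinish_eq, pvFinish_eq, pvStage_XY, pvStage_XY,
        PySem.List.foldl_append_singleton_eq_map, PySem.List.foldl_append_singleton_eq_map]
      simp
    | false =>
      simp only [hI, if_true, Bool.false_eq_true, reduceIte]
      rw [pvFinish_eq, pvFinish_eq, pvStage_YX, pvStage_XY,
        PySem.List.foldl_append_singleton_eq_map, PySem.List.foldl_append_singleton_eq_map]
      simp
  · by_cases hY : ((PySem.Str.split₀ tail).contains "you" || (PySem.Str.split₀ tail).contains "You") = true
    · cases single with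
      | true =>
        simp only [Bool.not_eq_true] at hI
        simp only [hI, hY, Bool.false_eq_true, reduceIte]
        rw [pvFinish_eq, pvFinish_eq, pvStage_YX, pvStage_YX,
          PySem.List.foldl_append_singleton_eq_map, PySem.List.foldl_append_singleton_eq_map]
        simp
      | false =>
        simp only [Bool.not_eq_true] at hI
        simp only [hI, hY, Bool.false_eq_true, reduceIte]
        rw [pvFinish_eq, pvFinish_eq, pvStage_XY, pvStage_YX,
          PySem.List.foldl_append_singleton_eq_map, PySem.List.foldl_append_singleton_eq_map]
        simp
    · simp only [Bool.not_eq_true] at hI hY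
      simp only [hI, hY, Bool.false_eq_true, reduceIte]
      rw [pvFinish_eq, pvFinish_eq]
      simp only [List.foldl_nil]
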